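-- pv_equiv track=rewrite | github.com/HOIHOIHOII/GameOfThronesDeathBingo | GoT_deathbingo.py | check_deaths
-- ===== SOURCE A (Python) =====
-- def check_deaths(name_grid, death_register):
--     '''takes a name grid and returns a death index grid filled with 0's and 1's,
--     along with the row, column and diagonal sums of the grid'''
--     num_grid = [[],[],[],[],[]]
--     for i in range(5):
--         for j in range(5):
--             if name_grid[i][j] in death_register:
--                 num_grid[i].append(1)
--             else:
--                 num_grid[i].append(0)
--     rowsums = [sum(i) for i in num_grid]
--     colsums = [sum([num_grid[i][j] for i in range(5)]) for j in range(5)]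
--     diag_ltr = [sum([num_grid[i][i] for i in range(5)])]
--     diag_rtl = [sum([num_grid[4-i][i] for i in range(5)])]
--     return num_grid, rowsums, colsums, diag_ltr, diag_rtl
-- ===== SOURCE B (Python) =====
-- def check_deaths(name_grid, death_register):
--     '''Inverted-index approach: index the grid by name -> coordinates once,
--     scan the register to collect the set of hit coordinates, and derive the
--     grid and all sums from that coordinate set.'''
--     pos = {}
--     for i in range(5):
--         for j in range(5):
--             pos.setdefault(name_grid[i][j], []).append((i, j))
--     hits = set()
--     for name in death_register:
--         for coord in pos.get(name, []):
--             hits.add(coord)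
--     num_grid = [[1 if (i, j) in hits else 0 for j in range(5)] for i in range(5)]
--     rowsums = [sum(1 for (a, b) in hits if a == i) for i in range(5)]
--     colsums = [sum(1 for (a, b) in hits if b == j) for j in range(5)]
--     diag_ltr = [sum(1 for (a, b) in hits if a == b)]
--     diag_rtl = [sum(1 for (a, b) in hits if a + b == 4)]
--     return num_grid, rowsums, colsums, diag_ltr, diag_rtl
-- ===== Notes on version B (the rewrite author's own statement) =====
-- stated objective: alternative
-- what changed: Replaces A's per-cell scan of the death register plus four separate re-indexing passes over the finished grid with an inverted index: the grid is indexed once by name into coordinate lists, the register is scanned once to collect the set of hit coordinates, and the 0/1 grid and all row/column/diagonal sums are derived by counting coordinates in that set; this removes the inner register scan per cell (O(25*|register|) membership tests become O(25+|register|) dict work).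
import Mathlib
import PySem

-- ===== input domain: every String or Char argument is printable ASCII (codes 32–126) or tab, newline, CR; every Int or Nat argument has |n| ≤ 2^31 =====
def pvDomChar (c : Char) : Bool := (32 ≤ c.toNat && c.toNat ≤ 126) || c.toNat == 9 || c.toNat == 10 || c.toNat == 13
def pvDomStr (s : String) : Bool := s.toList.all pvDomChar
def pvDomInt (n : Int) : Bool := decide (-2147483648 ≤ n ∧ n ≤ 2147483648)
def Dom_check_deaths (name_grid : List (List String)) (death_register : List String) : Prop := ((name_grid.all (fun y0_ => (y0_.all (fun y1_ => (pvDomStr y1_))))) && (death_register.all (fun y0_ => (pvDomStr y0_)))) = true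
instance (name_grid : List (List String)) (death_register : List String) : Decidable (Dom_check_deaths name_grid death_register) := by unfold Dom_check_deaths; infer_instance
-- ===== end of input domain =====

-- B replaces A's per-cell register scan and four grid re-scans with an inverted name->coordinates index and a hit-coordinate set from which grid and sums are counted.


-- ===== PORT A =====
-- num_grid built row by row with appends; rowsums/colsums/diagonals are four separate re-indexing scans.
-- name_grid[i][j] is ported as pyGetD (total form); Pre_ below guarantees all indices are in range.
def check_deaths (name_grid : List (List String)) (death_register : List String) : List (List Int) × List Int × List Int × List Int × List Int :=
  let num_grid : List (List Int) :=
    (PySem.List.pyRange 0 5 1).map (fun i =>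
      (PySem.List.pyRange 0 5 1).foldl (fun row j =>
        row ++ [if death_register.contains (PySem.List.pyGetD (PySem.List.pyGetD name_grid i []) j "") then (1 : Int) else 0]) [])
  let rowsums : List Int := num_grid.map List.sum
  let colsums : List Int :=
    (PySem.List.pyRange 0 5 1).map (fun j =>
      ((PySem.List.pyRange 0 5 1).map (fun i =>
        PySem.List.pyGetD (PySem.List.pyGetD num_grid i []) j (0 : Int))).sum)
  let diag_ltr : List Int :=
    [((PySem.List.pyRange 0 5 1).map (fun i =>
        PySem.List.pyGetD (PySem.List.pyGetD num_grid i []) i (0 : Int))).sum]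
  let diag_rtl : List Int :=
    [((PySem.List.pyRange 0 5 1).map (fun i =>
        PySem.List.pyGetD (PySem.List.pyGetD num_grid (4 - i) []) i (0 : Int))).sum]
  (num_grid, rowsums, colsums, diag_ltr, diag_rtl)

-- ===== PORT B =====
-- inverted index: pos maps each name to its list of coordinates (setdefault/append = Dict.modify);
-- hits is the set of coordinates hit by the register; grid and sums are counted from hits.
def check_deaths_alt (name_grid : List (List String)) (death_register : List String) : List (List Int) × List Int × List Int × List Int × List Int :=
  let pos : PySem.Dict String (List (Int × Int)) :=
    (PySem.List.pyRange 0 5 1).foldl (fun d i =>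
      (PySem.List.pyRange 0 5 1).foldl (fun d j =>
        d.modify (PySem.List.pyGetD (PySem.List.pyGetD name_grid i []) j "") [] (· ++ [(i, j)])) d)
      PySem.Dict.empty
  let hits : PySem.Set (Int × Int) :=
    death_register.foldl (fun s n => (pos.getD n []).foldl (fun s c => PySem.Set.add s c) s) PySem.Set.empty
  let num_grid : List (List Int) :=
    (PySem.List.pyRange 0 5 1).map (fun i =>
      (PySem.List.pyRange 0 5 1).map (fun j =>
        if PySem.Set.contains hits (i, j) then (1 : Int) else 0))
  let rowsums : List Int := (PySem.List.pyRange 0 5 1).map (fun i => (hits.countP (fun c => c.1 == i) : Int))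
  let colsums : List Int := (PySem.List.pyRange 0 5 1).map (fun j => (hits.countP (fun c => c.2 == j) : Int))
  let diag_ltr : List Int := [(hits.countP (fun c => c.1 == c.2) : Int)]
  let diag_rtl : List Int := [(hits.countP (fun c => c.1 + c.2 == 4) : Int)]
  (num_grid, rowsums, colsums, diag_ltr, diag_rtl)

-- ===== PRECONDITION & SPEC =====
-- Pre_ excludes exactly the inputs where Python A raises IndexError: fewer than 5 rows, or one of the
-- first 5 rows shorter than 5.
def Pre_check_deaths (name_grid : List (List String)) (death_register : List String) : Prop :=
  5 ≤ name_grid.length ∧ ∀ r ∈ name_grid.take 5, 5 ≤ r.length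
instance (name_grid : List (List String)) (death_register : List String) : Decidable (Pre_check_deaths name_grid death_register) := by unfold Pre_check_deaths; infer_instance

def pvWitness_check_deaths : List (List String) × List String :=
  ([["a","b","c","d","e"],["f","g","h","i","j"],["k","l","m","n","o"],["p","q","r","s","t"],["u","v","w","x","y"]], ["a","m","y","q"])

def Spec_check_deaths (name_grid : List (List String)) (death_register : List String) (out : List (List Int) × List Int × List Int × List Int × List Int) : Prop := out = check_deaths_alt name_grid death_register
instance (name_grid : List (List String)) (death_register : List String) (out : List (List Int) × List Int × List Int × List Int × List Int) : Decidable (Spec_check_deaths name_grid death_register out) := by unfold Spec_check_deaths; infer_instance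

-- ===== CLAIM (what is proved, stated in full; the proofs are below) =====
def Claim_equal_check_deaths : Prop := ∀ (name_grid : List (List String)) (death_register : List String), Dom_check_deaths name_grid death_register → Pre_check_deaths name_grid death_register → Spec_check_deaths name_grid death_register (check_deaths name_grid death_register)

-- ===== LEMMAS AND PROOFS =====

-- membership through B's hit-collection double loop (for name in register: for coord in pos.get(name): hits.add(coord))
theorem mem_hits_fold {α : Type} [BEq α] [LawfulBEq α] (N : List String) (g : String → List α) :
    ∀ (s : PySem.Set α) (x : α),
      x ∈ N.foldl (fun s n => (g n).foldl (fun s c => PySem.Set.add s c) s) s ↔ x ∈ s ∨ ∃ n ∈ N, x ∈ g n := by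
  induction N with
  | nil => simp
  | cons m N ih =>
    intro s x
    have hinner : x ∈ (g m).foldl (fun s c => PySem.Set.add s c) s ↔ x ∈ s ∨ x ∈ g m := by
      simpa using PySem.Set.mem_foldl_add (l := g m) (f := fun c => c) (s := s) (y := x)
    simp only [List.foldl_cons, ih, hinner, List.mem_cons]
    constructor
    · rintro ((h | hb) | ⟨n, hn, hx⟩)
      · exact Or.inl h
      · exact Or.inr ⟨m, Or.inl rfl, hb⟩
      · exact Or.inr ⟨n, Or.inr hn, hx⟩
    · rintro (h | ⟨n, (rfl | hn), hx⟩)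
      · exact Or.inl (Or.inl h)
      · exact Or.inl (Or.inr hx)
      · exact Or.inr ⟨n, hn, hx⟩

theorem nodup_hits_fold {α : Type} [BEq α] [LawfulBEq α] (N : List String) (g : String → List α) :
    ∀ (s : PySem.Set α), s.Nodup →
      (N.foldl (fun s n => (g n).foldl (fun s c => PySem.Set.add s c) s) s).Nodup := by
  induction N with
  | nil => intro s hs; simpa using hs
  | cons m N ih =>
    intro s hs
    simp only [List.foldl_cons]
    apply ih
    clear ih
    induction (g m) generalizing s with
    | nil => simpa using hs
    | cons c cs ih2 => exact ih2 _ (PySem.Set.nodup_add s c hs)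


theorem hits_perm (dr : List String) (cells : List (String × (Int × Int)))
    (hnd : (cells.map (fun q => q.2)).Nodup) :
    (dr.foldl (fun s n =>
        (((cells.foldl (fun d p => d.modify p.1 [] (fun x => x ++ [p.2])) PySem.Dict.empty).getD n [])).foldl
          (fun s c => PySem.Set.add s c) s) PySem.Set.empty).Perm
      ((cells.filter (fun q => dr.contains q.1)).map (fun q => q.2)) := by
  apply (List.perm_ext_iff_of_nodup ?_ ?_).mpr
  · intro x
    rw [mem_hits_fold]
    simp only [PySem.Dict.getD_foldl_modify_append, PySem.Dict.getD_empty, List.nil_append,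
      List.mem_map, List.mem_filter, List.contains_eq_mem, PySem.Set.empty, List.not_mem_nil, false_or]
    constructor
    · rintro ⟨n, hn, q, ⟨hq, he⟩, rfl⟩
      refine ⟨q, ⟨hq, ?_⟩, rfl⟩
      have hqn : q.1 = n := by simpa using he
      simp [hqn, hn]
    · rintro ⟨q, ⟨hq, hd⟩, rfl⟩
      exact ⟨q.1, by simpa using hd, q, ⟨hq, by simp⟩, rfl⟩
  · exact nodup_hits_fold _ _ _ (by simp [PySem.Set.empty])
  · exact (List.Sublist.map (fun q => q.2) (List.filter_sublist (l := cells))).nodup hnd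

-- ===== VERDICT (by name: the statement is the Claim_ definition above) =====
set_option maxHeartbeats 4000000 in
theorem check_deaths_spec : Claim_equal_check_deaths := by
  intro ng dr _ hpre
  obtain ⟨hlen, hrows⟩ := hpre
  rcases ng with _ | ⟨r0, ng⟩; · simp at hlen
  rcases ng with _ | ⟨r1, ng⟩; · simp at hlen
  rcases ng with _ | ⟨r2, ng⟩; · simp at hlen
  rcases ng with _ | ⟨r3, ng⟩; · simp at hlen
  rcases ng with _ | ⟨r4, ng⟩; · simp at hlen
  have h0 : 5 ≤ r0.length := hrows r0 (by simp)
  have h1 : 5 ≤ r1.length := hrows r1 (by simp)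
  have h2 : 5 ≤ r2.length := hrows r2 (by simp)
  have h3 : 5 ≤ r3.length := hrows r3 (by simp)
  have h4 : 5 ≤ r4.length := hrows r4 (by simp)
  rcases r0 with _ | ⟨a00, r0⟩; · simp at h0
  rcases r0 with _ | ⟨a01, r0⟩; · simp at h0
  rcases r0 with _ | ⟨a02, r0⟩; · simp at h0
  rcases r0 with _ | ⟨a03, r0⟩; · simp at h0
  rcases r0 with _ | ⟨a04, r0⟩; · simp at h0
  rcases r1 with _ | ⟨a10, r1⟩; · simp at h1
  rcases r1 with _ | ⟨a11, r1⟩; · simp at h1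
  rcases r1 with _ | ⟨a12, r1⟩; · simp at h1
  rcases r1 with _ | ⟨a13, r1⟩; · simp at h1
  rcases r1 with _ | ⟨a14, r1⟩; · simp at h1
  rcases r2 with _ | ⟨a20, r2⟩; · simp at h2
  rcases r2 with _ | ⟨a21, r2⟩; · simp at h2
  rcases r2 with _ | ⟨a22, r2⟩; · simp at h2
  rcases r2 with _ | ⟨a23, r2⟩; · simp at h2
  rcases r2 with _ | ⟨a24, r2⟩; · simp at h2
  rcases r3 with _ | ⟨a30, r3⟩; · simp at h3
  rcases r3 with _ | ⟨a31, r3⟩; · simp at h3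
  rcases r3 with _ | ⟨a32, r3⟩; · simp at h3
  rcases r3 with _ | ⟨a33, r3⟩; · simp at h3
  rcases r3 with _ | ⟨a34, r3⟩; · simp at h3
  rcases r4 with _ | ⟨a40, r4⟩; · simp at h4
  rcases r4 with _ | ⟨a41, r4⟩; · simp at h4
  rcases r4 with _ | ⟨a42, r4⟩; · simp at h4
  rcases r4 with _ | ⟨a43, r4⟩; · simp at h4
  rcases r4 with _ | ⟨a44, r4⟩; · simp at h4
  unfold Spec_check_deaths
  have hperm := hits_perm dr ([(a00,((0:Int),(0:Int))),(a01,((0:Int),(1:Int))),(a02,((0:Int),(2:Int))),(a03,((0:Int),(3:Int))),(a04,((0:Int),(4:Int))),(a10,((1:Int),(0:Int))),(a11,((1:Int),(1:Int))),(a12,((1:Int),(2:Int))),(a13,((1:Int),(3:Int))),(a14,((1:Int),(4:Int))),(a20,((2:Int),(0:Int))),(a21,((2:Int),(1:Int))),(a22,((2:Int),(2:Int))),(a23,((2:Int),(3:Int))),(a24,((2:Int),(4:Int))),(a30,((3:Int),(0:Int))),(a31,((3:Int),(1:Int))),(a32,((3:Int),(2:Int))),(a33,((3:Int),(3:Int))),(a34,((3:Int),(4:Int))),(a40,((4:Int),(0:Int))),(a41,((4:Int),(1:Int))),(a42,((4:Int),(2:Int))),(a43,((4:Int),(3:Int))),(a44,((4:Int),(4:Int)))]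 : List (String × (Int × Int))) (by simp only [List.map_cons, List.map_nil]; decide)
  have hcount := fun p => List.Perm.countP_eq p hperm
  have hmemiff := fun x => List.Perm.mem_iff (a := x) hperm
  have hcont : ∀ x : Int × Int, PySem.Set.contains (dr.foldl (fun s n =>
        ((((([(a00,((0:Int),(0:Int))),(a01,((0:Int),(1:Int))),(a02,((0:Int),(2:Int))),(a03,((0:Int),(3:Int))),(a04,((0:Int),(4:Int))),(a10,((1:Int),(0:Int))),(a11,((1:Int),(1:Int))),(a12,((1:Int),(2:Int))),(a13,((1:Int),(3:Int))),(a14,((1:Int),(4:Int))),(a20,((2:Int),(0:Int))),(a21,((2:Int),(1:Int))),(a22,((2:Int),(2:Int))),(a23,((2:Int),(3:Int))),(a24,((2:Int),(4:Int))),(a30,((3:Int),(0:Int))),(a31,((3:Int),(1:Int))),(a32,((3:Int),(2:Int))),(a33,((3:Int),(3:Int))),(a34,((3:Int),(4:Int))),(a40,((4:Int),(0:Int))),(a41,((4:Int),(1:Int))),(a42,((4:Int),(2:Int))),(a43,((4:Int),(3:Int))),(a44,((4:Int),(4:Int)))] : List (String × (Int × Int))).foldl (fun d p => d.modify p.1 []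 (fun x => x ++ [p.2])) PySem.Dict.empty)).getD n [])).foldl
          (fun s c => PySem.Set.add s c) s) PySem.Set.empty) x
      = List.contains ((([(a00,((0:Int),(0:Int))),(a01,((0:Int),(1:Int))),(a02,((0:Int),(2:Int))),(a03,((0:Int),(3:Int))),(a04,((0:Int),(4:Int))),(a10,((1:Int),(0:Int))),(a11,((1:Int),(1:Int))),(a12,((1:Int),(2:Int))),(a13,((1:Int),(3:Int))),(a14,((1:Int),(4:Int))),(a20,((2:Int),(0:Int))),(a21,((2:Int),(1:Int))),(a22,((2:Int),(2:Int))),(a23,((2:Int),(3:Int))),(a24,((2:Int),(4:Int))),(a30,((3:Int),(0:Int))),(a31,((3:Int),(1:Int))),(a32,((3:Int),(2:Int))),(a33,((3:Int),(3:Int))),(a34,((3:Int),(4:Int))),(a40,((4:Int),(0:Int))),(a41,((4:Int),(1:Int))),(a42,((4:Int),(2:Int))),(a43,((4:Int),(3:Int))),(a44,((4:Int),(4:Int)))] : List (String × (Int × Int))).filter (fun q => dr.contains q.1)).map (fun q => q.2)) x := by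
    intro x
    simp only [PySem.Set.contains_eq_listContains, List.contains_eq_mem, hmemiff x]
  have hpos : (PySem.List.pyRange 0 5 1).foldl (fun d i =>
      (PySem.List.pyRange 0 5 1).foldl (fun d j =>
        d.modify (PySem.List.pyGetD (PySem.List.pyGetD ((a00::a01::a02::a03::a04::r0)::(a10::a11::a12::a13::a14::r1)::(a20::a21::a22::a23::a24::r2)::(a30::a31::a32::a33::a34::r3)::(a40::a41::a42::a43::a44::r4)::ng) i []) j "") [] (fun x => x ++ [(i, j)])) d)
      PySem.Dict.empty
    = ([(a00,((0:Int),(0:Int))),(a01,((0:Int),(1:Int))),(a02,((0:Int),(2:Int))),(a03,((0:Int),(3:Int))),(a04,((0:Int),(4:Int))),(a10,((1:Int),(0:Int))),(a11,((1:Int),(1:Int))),(a12,((1:Int),(2:Int))),(a13,((1:Int),(3:Int))),(a14,((1:Int),(4:Int))),(a20,((2:Int),(0:Int))),(a21,((2:Int),(1:Int))),(a22,((2:Int),(2:Int))),(a23,((2:Int),(3:Int))),(a24,((2:Int),(4:Int))),(a30,((3:Int),(0:Int))),(a31,((3:Int),(1:Int))),(a32,((3:Int),(2:Int))),(a33,((3:Int),(3:Int))),(a34,((3:Int),(4:Int))),(a40,((4:Int),(0:Int))),(a41,((4:Int),(1:Int))),(a42,((4:Int),(2:Int))),(a43,((4:Int),(3:Int))),(a44,((4:Int),(4:Int)))]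 : List (String × (Int × Int))).foldl
        (fun d p => d.modify p.1 [] (fun x => x ++ [p.2])) PySem.Dict.empty := by
    rw [show PySem.List.pyRange 0 5 1 = [0,1,2,3,4] from by decide]
    simp only [List.foldl_cons, List.foldl_nil, PySem.List.pyGetD_ofNat', List.getD,
      List.getElem?_cons_zero, List.getElem?_cons_succ, Option.getD_some]
  simp only [check_deaths, check_deaths_alt]
  rw [hpos]
  simp only [hcount, hcont]
  rw [show PySem.List.pyRange 0 5 1 = [0,1,2,3,4] from by decide]
  simp only [List.foldl_cons, List.foldl_nil, List.map_cons, List.map_nil,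
    PySem.List.pyGetD_ofNat', List.getD, List.getElem?_cons_zero, List.getElem?_cons_succ,
    Option.getD_some, List.countP_map, List.countP_filter,
    List.countP_cons, List.countP_nil, List.contains_eq_mem, List.mem_map, List.mem_filter]
  norm_num [Prod.ext_iff, List.sum_cons]
  simp only [PySem.List.pyGetD_ofNat', List.getD, List.getElem?_cons_zero, List.getElem?_cons_succ,
    Option.getD_some]
  and_intros <;> ring
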